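-- pv_equiv track=rewrite | github.com/austencloud/the-kinetic-constructor-desktop | src/main_window/main_widget/browse_tab/thumbnail_box/modern_thumbnail_box_integrated.py | calculate_responsive_columns
-- ===== SOURCE A (Python) =====
-- def calculate_responsive_columns(available_width: int) -> int:
--     """
--     Calculate responsive column count based on available width.
--
--     ENHANCEMENT: Responsive column calculation for different screen sizes.
--     """
--     # Responsive breakpoints for better layout
--     breakpoints = {
--         800: 1,  # Mobile-like: 1 column
--         1200: 2,  # Tablet-like: 2 columns
--         1600: 3,  # Desktop: 3 columns (current default)
--         2000: 4,  # Wide desktop: 4 columns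
--     }
--
--     # Minimum thumbnail width for quality display
--     min_thumbnail_width = 180
--
--     # Calculate maximum possible columns based on width
--     max_possible_columns = available_width // min_thumbnail_width
--
--     # Find appropriate column count based on breakpoints
--     for width_threshold in sorted(breakpoints.keys()):
--         if available_width <= width_threshold:
--             return min(breakpoints[width_threshold], max_possible_columns)
--
--     # For very wide screens, use maximum columns but cap at 4
--     return min(4, max_possible_columns)
-- ===== SOURCE B (Python) =====
-- def calculate_responsive_columns(available_width: int) -> int:
--     # breakpoints 800,1200,1600,2000 are uniformly 400 apart, so the column
--     # bracket is just a clamped ceiling division: ceil((w - 400) / 400) in [1, 4]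
--     bracket = -((400 - available_width) // 400)
--     if bracket < 1:
--         bracket = 1
--     elif bracket > 4:
--         bracket = 4
--     return min(bracket, available_width // 180)
-- ===== Notes on version B (the rewrite author's own statement) =====
-- stated objective: simpler
-- what changed: Drops the breakpoint table entirely: since the thresholds 800/1200/1600/2000 are uniformly 400 apart, B computes the column bracket as a clamped ceiling division -((400 - w) // 400) bounded to [1,4], then takes min with w // 180; no dict, no sorted keys, no scan.
import Mathlib
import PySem

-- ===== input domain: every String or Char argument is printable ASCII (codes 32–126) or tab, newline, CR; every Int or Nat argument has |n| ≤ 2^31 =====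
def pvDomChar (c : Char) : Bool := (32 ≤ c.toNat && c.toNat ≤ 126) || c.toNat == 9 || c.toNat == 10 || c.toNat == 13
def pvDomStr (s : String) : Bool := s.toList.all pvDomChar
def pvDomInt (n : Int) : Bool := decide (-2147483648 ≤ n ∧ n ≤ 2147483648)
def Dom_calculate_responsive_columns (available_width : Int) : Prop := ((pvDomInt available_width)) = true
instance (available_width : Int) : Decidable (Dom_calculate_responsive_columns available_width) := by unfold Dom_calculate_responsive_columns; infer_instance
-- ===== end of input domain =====

-- B replaces A's breakpoint table and scan by a single clamped ceiling division (the thresholds are uniformly 400 apart); objective: simpler.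

-- ===== PORT A =====
-- 'for width_threshold in sorted(breakpoints.keys()): if available_width <= t: return min(breakpoints[t], max_possible_columns)'
def crcLoop (available_width max_possible_columns : Int) : List (Int × Int) → Int
  | [] => min 4 max_possible_columns
  | (t, c) :: rest =>
      if available_width ≤ t then min c max_possible_columns
      else crcLoop available_width max_possible_columns rest

def calculate_responsive_columns (available_width : Int) : Int :=
  let max_possible_columns := PySem.Int.floordiv available_width 180
  crcLoop available_width max_possible_columns [(800, 1), (1200, 2), (1600, 3), (2000, 4)]

-- ===== PORT B =====
def calculate_responsive_columns_alt (available_width : Int) : Int :=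
  let bracket := -(PySem.Int.floordiv (400 - available_width) 400)
  let bracket := if bracket < 1 then 1 else if bracket > 4 then 4 else bracket
  min bracket (PySem.Int.floordiv available_width 180)

-- ===== PRECONDITION & SPEC =====
def Spec_calculate_responsive_columns (available_width : Int) (out : Int) : Prop := out = calculate_responsive_columns_alt available_width
instance (available_width : Int) (out : Int) : Decidable (Spec_calculate_responsive_columns available_width out) := by unfold Spec_calculate_responsive_columns; infer_instance

-- ===== CLAIM (what is proved, stated in full; the proofs are below) =====
def Claim_equal_calculate_responsive_columns : Prop := ∀ (available_width : Int), Dom_calculate_responsive_columns available_width → Spec_calculate_responsive_columns available_width (calculate_responsive_columns available_width)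

-- ===== LEMMAS AND PROOFS =====

-- ===== VERDICT (by name: the statement is the Claim_ definition above) =====
theorem calculate_responsive_columns_spec : Claim_equal_calculate_responsive_columns := by
  intro w _
  unfold Spec_calculate_responsive_columns calculate_responsive_columns calculate_responsive_columns_alt
  simp only [crcLoop,
    PySem.Int.floordiv_eq_ediv_of_pos (b := 180) (by norm_num),
    PySem.Int.floordiv_eq_ediv_of_pos (b := 400) (by norm_num)]
  split_ifs <;> omega
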